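-- pv_equiv track=rewrite | github.com/adamfast/faddsdata | apt.py | calculate_lengths
-- ===== SOURCE A (Python) =====
-- def calculate_lengths(fields):
--     count = 0
--     out = []
--     for i in fields:
--         end = 0
--         for x in range(0, count):
--             end += fields[x]
--         if end != 0:
--             out.append(end)
--         count += 1
--     return out
-- ===== SOURCE B (Python) =====
-- def calculate_lengths(fields):
--     # single pass with a running prefix sum instead of re-summing the prefix for each element
--     out = []
--     total = 0
--     for f in fields:
--         if total != 0:
--             out.append(total)
--         total += f
--     return out
-- ===== Notes on version B (the rewrite author's own statement) =====
-- stated objective: faster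
-- what changed: Replaces the nested re-summation of fields[0:count] for every element by a single pass that maintains a running prefix sum and appends it when nonzero.
import Mathlib
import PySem

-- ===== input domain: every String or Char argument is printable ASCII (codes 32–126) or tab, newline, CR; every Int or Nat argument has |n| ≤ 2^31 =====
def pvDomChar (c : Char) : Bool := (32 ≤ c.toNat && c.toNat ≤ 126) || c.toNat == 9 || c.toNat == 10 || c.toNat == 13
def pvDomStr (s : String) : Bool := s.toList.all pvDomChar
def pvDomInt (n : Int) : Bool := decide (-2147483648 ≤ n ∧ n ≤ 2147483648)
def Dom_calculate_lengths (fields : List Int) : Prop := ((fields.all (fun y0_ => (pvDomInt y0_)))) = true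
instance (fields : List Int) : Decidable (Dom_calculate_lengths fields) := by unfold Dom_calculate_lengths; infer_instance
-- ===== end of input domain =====

-- B replaces A's O(n^2) re-summation of the prefix for every element by one pass with a running prefix sum (objective: faster, asymptotic).

-- ===== PORT A =====
-- inner loop 'end = 0; for x in range(0, count): end += fields[x]'
-- (fields[x] ported as pyGetD _ _ 0: exact, since 0 ≤ x < count ≤ len(fields) always holds here)
def pvInnerA (fields : List Int) (count : Int) : Int :=
  (PySem.List.pyRange 0 count 1).foldl (fun e x => e + PySem.List.pyGetD fields x 0) 0

-- one iteration of A's outer loop over state (count, out)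
def pvStepA (fields : List Int) (st : Int × List Int) (_i : Int) : Int × List Int :=
  let ed := pvInnerA fields st.1
  (st.1 + 1, if ed ≠ 0 then st.2 ++ [ed] else st.2)

def calculate_lengths (fields : List Int) : List Int :=
  (fields.foldl (pvStepA fields) (0, [])).2

-- ===== PORT B =====
-- one iteration of B's loop over state (total, out)
def pvStepB (st : Int × List Int) (f : Int) : Int × List Int :=
  (st.1 + f, if st.1 ≠ 0 then st.2 ++ [st.1] else st.2)

def calculate_lengths_alt (fields : List Int) : List Int :=
  (fields.foldl pvStepB (0, [])).2

-- ===== PRECONDITION & SPEC =====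
def Spec_calculate_lengths (fields : List Int) (out : List Int) : Prop := out = calculate_lengths_alt fields
instance (fields : List Int) (out : List Int) : Decidable (Spec_calculate_lengths fields out) := by unfold Spec_calculate_lengths; infer_instance

-- ===== CLAIM (what is proved, stated in full; the proofs are below) =====
def Claim_equal_calculate_lengths : Prop := ∀ (fields : List Int), Dom_calculate_lengths fields → Spec_calculate_lengths fields (calculate_lengths fields)

-- ===== LEMMAS AND PROOFS =====

-- A's inner loop computes the sum of the first k elements
theorem pvInnerA_eq (fields : List Int) (k : Nat) (hk : k ≤ fields.length) :
    pvInnerA fields (k : Int) = (fields.take k).sum := by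
  induction k with
  | zero => simp [pvInnerA, PySem.List.pyRange_one_eq_nil]
  | succ n ih =>
    have hn : n ≤ fields.length := Nat.le_of_succ_le hk
    have hlt : n < fields.length := hk
    have hsplit : PySem.List.pyRange 0 ((n : Int) + 1) 1
        = PySem.List.pyRange 0 (n : Int) 1 ++ [(n : Int)] :=
      PySem.List.pyRange_one_succ_right (by exact_mod_cast Nat.zero_le n)
    rw [pvInnerA]
    push_cast
    rw [hsplit, List.foldl_append]
    have hget : PySem.List.pyGetD fields (n : Int) 0 = fields[n] := by
      simp [PySem.List.pyGetD, PySem.List.pyGet?, PySem.List.pyIdx?, hlt]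
    simp only [List.foldl_cons, List.foldl_nil, hget]
    rw [← pvInnerA, ih hn]
    have hsum : (List.take (n + 1) fields).sum = (List.take n fields).sum + fields[n] := by
      rw [List.take_succ_eq_append_getElem hlt, List.sum_append, List.sum_cons, List.sum_nil,
        add_zero]
    exact hsum.symm

-- both loops, run in lockstep over the remaining suffix, produce the same output list
theorem pvLoop_eq (fields : List Int) :
    ∀ (suffix : List Int) (k : Nat) (out : List Int),
      fields.drop k = suffix →
      (suffix.foldl (pvStepA fields) ((k : Int), out)).2
        = (suffix.foldl pvStepB ((fields.take k).sum, out)).2 := by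
  intro suffix
  induction suffix with
  | nil => intro k out _; simp
  | cons f rest ih =>
    intro k out hdrop
    have hk : k < fields.length := by
      by_contra h
      have : fields.drop k = [] := List.drop_eq_nil_of_le (Nat.le_of_not_lt h)
      rw [hdrop] at this; exact List.cons_ne_nil _ _ this
    have hf : fields[k] = f := by
      have := List.drop_eq_getElem_cons hk
      rw [hdrop] at this
      exact (List.cons.injEq _ _ _ _ ▸ this.symm).1
    have hdrop' : fields.drop (k + 1) = rest := by
      have := List.drop_eq_getElem_cons hk
      rw [hdrop, hf] at this
      exact (List.cons.injEq _ _ _ _).mp this.symm |>.2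
    have hsum : (fields.take (k + 1)).sum = (fields.take k).sum + f := by
      rw [List.take_add_one, List.getElem?_eq_getElem hk]
      simp [hf]
    simp only [List.foldl_cons]
    have hA : pvStepA fields ((k : Int), out) f
        = ((k : Int) + 1, if (fields.take k).sum ≠ 0 then out ++ [(fields.take k).sum] else out) := by
      simp [pvStepA, pvInnerA_eq fields k (Nat.le_of_lt hk)]
    have hB : pvStepB ((fields.take k).sum, out) f
        = ((fields.take (k + 1)).sum, if (fields.take k).sum ≠ 0 then out ++ [(fields.take k).sum] else out) := by
      simp [pvStepB, hsum]
    rw [hA, hB]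
    have hcast : ((k : Int) + 1) = ((k + 1 : Nat) : Int) := by push_cast; ring
    rw [hcast]
    exact ih (k + 1) _ hdrop'

-- ===== VERDICT (by name: the statement is the Claim_ definition above) =====
theorem calculate_lengths_spec : Claim_equal_calculate_lengths := by
  intro fields _
  unfold Spec_calculate_lengths calculate_lengths calculate_lengths_alt
  have := pvLoop_eq fields fields 0 [] (by simp)
  simpa using this
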